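-- pv_equiv track=rewrite | github.com/yasserfarouk/scml-agents | scml_agents/scml2025/standard/team_253/supply_demand_allocator.py | _distribute_equally_limited
-- ===== SOURCE A (Python) =====
-- def _distribute_equally_limited(quantity: int, partners: list[str], max_per_partner: int) -> list[int]:
--     """
--     与えられたquantityを全パートナーに可能な限り平等に分配する．
--     ただし1人あたりmax_per_partnerを超えない．
--     戻り値は quantity のリスト（partner順）．
--     """
--     n = len(partners)
--     if n == 0 or quantity <= 0:
--         return [0] * n
--
--     base = min(quantity // n, max_per_partner)
--     result = [base] * n
--     remainder = quantity - base * n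
--
--     # 余りを1個ずつ，max_per_partnerに達していない人に追加
--     for i in range(n):
--         if remainder == 0:
--             break
--         if result[i] < max_per_partner:
--             result[i] += 1
--             remainder -= 1
--
--     return result
-- ===== SOURCE B (Python) =====
-- def _distribute_equally_limited(quantity: int, partners: list[str], max_per_partner: int) -> list[int]:
--     # Sequential greedy: walk the partners keeping the remaining quantity;
--     # each partner receives min(cap, ceil(remaining / partners_left)).
--     if not partners or quantity <= 0:
--         return [0] * len(partners)
--     result = []
--     remaining = quantity
--     for k in range(len(partners), 0, -1):
--         if remaining <= 0:
--             result.append(0)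
--         else:
--             share = min(max_per_partner, -(-remaining // k))
--             result.append(share)
--             remaining -= share
--     return result
-- ===== Notes on version B (the rewrite author's own statement) =====
-- stated objective: alternative
-- what changed: Replaces the build-a-full-array-then-patch allocation (replicate base, then a breaking loop that spreads the remainder) with a sequential greedy pass that keeps a running remaining quantity and hands each partner min(cap, ceil(remaining/partners_left)).
import Mathlib
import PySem

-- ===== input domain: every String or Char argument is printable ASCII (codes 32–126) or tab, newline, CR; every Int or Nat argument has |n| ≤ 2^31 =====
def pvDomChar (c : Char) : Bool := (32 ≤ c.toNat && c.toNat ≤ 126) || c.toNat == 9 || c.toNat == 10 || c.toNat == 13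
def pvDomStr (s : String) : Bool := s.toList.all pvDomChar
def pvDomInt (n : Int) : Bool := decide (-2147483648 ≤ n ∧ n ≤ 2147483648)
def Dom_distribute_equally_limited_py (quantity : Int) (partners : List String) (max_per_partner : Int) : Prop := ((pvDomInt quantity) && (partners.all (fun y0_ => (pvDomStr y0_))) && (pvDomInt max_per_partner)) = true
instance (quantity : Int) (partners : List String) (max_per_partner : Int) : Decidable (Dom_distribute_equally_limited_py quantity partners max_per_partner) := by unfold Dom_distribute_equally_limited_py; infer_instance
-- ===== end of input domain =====

-- B replaces A's build-array-then-patch allocation with a sequential greedy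
-- pass keeping the remaining quantity: each partner gets
-- min(cap, ceil(remaining/partners_left)); same return values.
-- ===== PORT A =====
-- the patch loop: walks result left to right, breaks when remainder hits 0,
-- increments entries below the cap, decrementing remainder
def pvALoop (maxp : Int) : List Int → Int → List Int
  | [], _ => []
  | r :: rs, rem =>
    if rem = 0 then r :: rs
    else if r < maxp then (r + 1) :: pvALoop maxp rs (rem - 1)
    else r :: pvALoop maxp rs rem

def distribute_equally_limited_py (quantity : Int) (partners : List String) (max_per_partner : Int) : List Int :=
  let n := partners.length
  if n = 0 ∨ quantity ≤ 0 then List.replicate n 0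
  else
    let base := min (PySem.Int.floordiv quantity (n : Int)) max_per_partner
    let result := List.replicate n base
    let remainder := quantity - base * (n : Int)
    pvALoop max_per_partner result remainder

-- ===== PORT B =====
-- B's loop: k counts the partners still to serve (range(n, 0, -1)),
-- remaining is the quantity left; each gets min(cap, ceil(remaining/k))
def pvBLoop (maxp : Int) : Nat → Int → List Int
  | 0, _ => []
  | k + 1, remaining =>
    if remaining ≤ 0 then 0 :: pvBLoop maxp k remaining
    else
      let share := min maxp (-(PySem.Int.floordiv (-remaining) ((k + 1 : Nat) : Int)))
      share :: pvBLoop maxp k (remaining - share)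

def distribute_equally_limited_py_alt (quantity : Int) (partners : List String) (max_per_partner : Int) : List Int :=
  if partners = [] ∨ quantity ≤ 0 then List.replicate partners.length 0
  else pvBLoop max_per_partner partners.length quantity

-- ===== PRECONDITION & SPEC =====
def Spec_distribute_equally_limited_py (quantity : Int) (partners : List String) (max_per_partner : Int) (out : List Int) : Prop := out = distribute_equally_limited_py_alt quantity partners max_per_partner
instance (quantity : Int) (partners : List String) (max_per_partner : Int) (out : List Int) : Decidable (Spec_distribute_equally_limited_py quantity partners max_per_partner out) := by unfold Spec_distribute_equally_limited_py; infer_instance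

-- ===== CLAIM (what is proved, stated in full; the proofs are below) =====
def Claim_equal_distribute_equally_limited_py : Prop := ∀ (quantity : Int) (partners : List String) (max_per_partner : Int), Dom_distribute_equally_limited_py quantity partners max_per_partner → Spec_distribute_equally_limited_py quantity partners max_per_partner (distribute_equally_limited_py quantity partners max_per_partner)

-- ===== LEMMAS AND PROOFS =====
-- closed form both sides are reduced to: first r entries are d+1, the rest d
def pvClosed (n : Nat) (d r : Int) : List Int :=
  (List.range n).map (fun (i : Nat) => d + (if (i : Int) < r then 1 else 0))

lemma pvClosed_nonpos (n : Nat) (d r : Int) (h : r ≤ 0) :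
    pvClosed n d r = List.replicate n d := by
  have hf : ∀ i : Nat, ¬ ((i : Int) < r) := fun i => by omega
  simp [pvClosed, hf, List.map_const']

lemma pvClosed_succ (k : Nat) (d r : Int) :
    pvClosed (k + 1) d r = (d + (if 0 < r then 1 else 0)) :: pvClosed k d (r - 1) := by
  rw [pvClosed, List.range_succ_eq_map, List.map_cons, List.map_map]
  refine List.cons_eq_cons.mpr ⟨by norm_num, ?_⟩
  apply List.map_congr_left
  intro i _
  simp only [Function.comp_apply]
  by_cases hi : (i : Int) < r - 1
  · rw [if_pos hi, if_pos (by push_cast; omega)]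
  · rw [if_neg hi, if_neg (by push_cast; omega)]

-- A's loop on a capped constant list: nothing is below the cap, unchanged
lemma pvALoop_capped (maxp : Int) (n : Nat) (rem : Int) :
    pvALoop maxp (List.replicate n maxp) rem = List.replicate n maxp := by
  induction n generalizing rem with
  | zero => simp [pvALoop]
  | succ k ih =>
    simp only [List.replicate_succ, pvALoop]
    split_ifs with h1 h2
    · rfl
    · exact absurd h2 (lt_irrefl maxp)
    · rw [ih]

-- A's loop on a constant list strictly below the cap with 0 ≤ rem:
-- the first rem entries get +1 (all of them if rem ≥ length)
lemma pvALoop_below (maxp base : Int) (hb : base < maxp) (n : Nat) (rem : Int) (h0 : 0 ≤ rem) :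
    pvALoop maxp (List.replicate n base) rem = pvClosed n base rem := by
  induction n generalizing rem with
  | zero => simp [pvALoop, pvClosed]
  | succ k ih =>
    rcases eq_or_lt_of_le h0 with h1 | h1
    · rw [List.replicate_succ, pvALoop, if_pos h1.symm, pvClosed_nonpos _ _ _ (le_of_eq h1.symm),
        List.replicate_succ]
    · rw [List.replicate_succ, pvALoop, if_neg (by omega), if_pos hb, ih (rem - 1) (by omega),
        pvClosed_succ, if_pos h1]

-- B's loop once the quantity is exhausted: all zeros
lemma pvBLoop_nonpos (maxp : Int) (k : Nat) (remaining : Int) (h : remaining ≤ 0) :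
    pvBLoop maxp k remaining = List.replicate k 0 := by
  induction k with
  | zero => rfl
  | succ m ih => rw [pvBLoop, if_pos h, ih, List.replicate_succ]

-- B's loop when the cap binds throughout: every partner gets maxp
lemma pvBLoop_capped (maxp : Int) (k : Nat) :
    ∀ q : Int, 0 < q → maxp * (k : Int) ≤ q →
    pvBLoop maxp k q = List.replicate k maxp := by
  induction k with
  | zero => intro q _ _; rfl
  | succ m ih =>
    intro q hq hcap
    have hn : (0:Int) < ((m + 1 : Nat) : Int) := by positivity
    have hlen : ((m + 1 : Nat) : Int) = (m : Int) + 1 := by push_cast; ring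
    have hcap' : maxp * ((m : Int) + 1) ≤ q := by rw [← hlen]; simpa using hcap
    have hceil : maxp ≤ -(PySem.Int.floordiv (-q) ((m + 1 : Nat) : Int)) := by
      have h2 : PySem.Int.floordiv (-q) ((m + 1 : Nat) : Int) < -maxp + 1 := by
        rw [PySem.Int.floordiv_lt_iff_lt_mul hn, hlen]
        have hm : (0:Int) ≤ (m : Int) := by positivity
        nlinarith
      omega
    rw [pvBLoop, if_neg (by omega)]
    simp only [min_eq_left hceil]
    rcases Nat.eq_zero_or_pos m with hm | hm
    · subst hm; rfl
    · have hmpos : (0:Int) < (m : Int) := by exact_mod_cast hm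
      have hq' : 0 < q - maxp := by nlinarith
      have hcap2 : maxp * (m : Int) ≤ q - maxp := by nlinarith
      rw [ih (q - maxp) hq' hcap2, List.replicate_succ]

-- B's loop when the fair share is below the cap: the closed form
lemma pvBLoop_below (maxp : Int) (k : Nat) :
    ∀ q d r : Int, 0 < q → q = d * (k : Int) + r → 0 ≤ r → r < (k : Int) → d < maxp →
    pvBLoop maxp k q = pvClosed k d r := by
  induction k with
  | zero => intro q d r _ _ h1 h2; omega
  | succ m ih =>
    intro q d r hq hdecomp hr0 hrn hd
    have hn : (0:Int) < ((m + 1 : Nat) : Int) := by positivity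
    have hlen : ((m + 1 : Nat) : Int) = (m : Int) + 1 := by push_cast; ring
    have hm0 : (0:Int) ≤ (m : Int) := by positivity
    have hrn' : r < (m : Int) + 1 := by rw [← hlen]; simpa using hrn
    have hdecomp' : q = d * ((m : Int) + 1) + r := by rw [← hlen]; simpa using hdecomp
    have hceil : -(PySem.Int.floordiv (-q) ((m + 1 : Nat) : Int))
        = d + (if 0 < r then 1 else 0) := by
      rw [PySem.Int.neg_floordiv_neg_eq_iff_of_pos hn, hlen]
      by_cases h1 : 0 < r
      · rw [if_pos h1]; constructor <;> nlinarith
      · rw [if_neg h1]; constructor <;> nlinarith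
    rw [pvBLoop, if_neg (by omega)]
    simp only [hceil, min_eq_right (by split_ifs <;> omega : d + (if 0 < r then 1 else 0) ≤ maxp)]
    rw [pvClosed_succ m d r]
    refine List.cons_eq_cons.mpr ⟨rfl, ?_⟩
    set share := d + (if 0 < r then 1 else 0) with hsh
    have hd0 : 0 ≤ d := by nlinarith
    have hdecomp2 : q - share = d * (m : Int) + (r - (if 0 < r then 1 else 0)) := by
      rw [hsh, hdecomp']; split_ifs <;> ring
    by_cases hqpos : 0 < q - share
    · have hmpos : (0:Int) < (m : Int) := by
        rcases Nat.eq_zero_or_pos m with hm | hm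
        · exfalso; subst hm
          simp only [Nat.cast_zero, mul_zero, zero_add] at hdecomp2 hrn'
          split_ifs at hdecomp2 <;> omega
        · exact_mod_cast hm
      rw [ih (q - share) d (r - (if 0 < r then 1 else 0)) hqpos hdecomp2
          (by split_ifs <;> omega) (by split_ifs <;> omega) hd]
      split_ifs with h1
      · rfl
      · rw [pvClosed_nonpos _ _ _ (by omega), pvClosed_nonpos _ _ _ (by omega)]
    · -- quantity exhausted: B's loop yields zeros, closed form is all zeros
      have h1 : ¬ 0 < r - (if 0 < r then 1 else 0) := by
        by_contra h
        have : 0 < d * (m : Int) + (r - (if 0 < r then 1 else 0)) := by positivity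
        omega
      have hr1 : r - 1 ≤ 0 := by split_ifs at h1 <;> omega
      have hdz : d * (m : Int) = 0 := by
        rcases lt_or_ge 0 (d * (m : Int)) with h | h
        · exfalso; apply hqpos; rw [hdecomp2]; split_ifs at h1 ⊢ <;> omega
        · have : 0 ≤ d * (m : Int) := by positivity
          omega
      rw [pvBLoop_nonpos maxp m _ (le_of_not_gt hqpos), pvClosed_nonpos _ _ _ hr1]
      rcases mul_eq_zero.mp hdz with h | h
      · rw [h]
      · have hm0' : m = 0 := by exact_mod_cast h
        rw [hm0', List.replicate_zero, List.replicate_zero]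

-- ===== VERDICT (by name: the statement is the Claim_ definition above) =====
theorem distribute_equally_limited_py_spec : Claim_equal_distribute_equally_limited_py := by
  intro quantity partners maxp _
  unfold Spec_distribute_equally_limited_py
  rw [distribute_equally_limited_py, distribute_equally_limited_py_alt]
  by_cases hg : partners.length = 0 ∨ quantity ≤ 0
  · have hg' : partners = [] ∨ quantity ≤ 0 := by
      rcases hg with h | h
      · exact Or.inl (List.length_eq_zero_iff.mp h)
      · exact Or.inr h
    rw [if_pos hg, if_pos hg']
  · have hg' : ¬ (partners = [] ∨ quantity ≤ 0) := by
      intro h; apply hg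
      rcases h with h | h
      · exact Or.inl (by simp [h])
      · exact Or.inr h
    rw [if_neg hg, if_neg hg']
    dsimp only
    push Not at hg
    obtain ⟨hn0, hqpos⟩ := hg
    have hnpos : (0:Int) < (partners.length : Int) := by
      exact_mod_cast Nat.pos_of_ne_zero hn0
    have hdm : PySem.Int.floordiv quantity (partners.length : Int) * (partners.length : Int)
        + PySem.Int.mod quantity (partners.length : Int) = quantity :=
      PySem.Int.floordiv_mul_add_mod quantity (partners.length : Int)
    have hr0 : 0 ≤ PySem.Int.mod quantity (partners.length : Int) :=
      PySem.Int.mod_nonneg quantity hnpos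
    have hrn : PySem.Int.mod quantity (partners.length : Int) < (partners.length : Int) :=
      PySem.Int.mod_lt quantity hnpos
    by_cases hb : PySem.Int.floordiv quantity (partners.length : Int) < maxp
    · rw [min_eq_left (le_of_lt hb)]
      have hrem : quantity - PySem.Int.floordiv quantity (partners.length : Int)
          * (partners.length : Int) = PySem.Int.mod quantity (partners.length : Int) := by omega
      rw [hrem, pvALoop_below maxp _ hb partners.length _ hr0,
        pvBLoop_below maxp partners.length quantity _ _ hqpos (by omega) hr0 hrn hb]
    · rw [min_eq_right (le_of_not_gt hb), pvALoop_capped]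
      have hcap : maxp * (partners.length : Int) ≤ quantity := by
        nlinarith [le_of_not_gt hb]
      rw [pvBLoop_capped maxp partners.length quantity hqpos hcap]
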